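-- pv_equiv track=rewrite | github.com/cheraghiam/python_project | level_1/Monty_Hall_Simulation/sulotion2/src/game_logic.py | find_another_goat
-- ===== SOURCE A (Python) =====
-- doors = ['car'] + ['goat'] * 2
--
-- def find_another_goat(user_input):
--     for i, w in enumerate(doors):
--         if i == user_input:
--             pass
--         elif w == 'goat':
--             another_goat = i
--             break
--
--     return another_goat + 1
-- ===== SOURCE B (Python) =====
-- def find_another_goat(user_input):
--     # Closed form from the fixed layout: goats at indices 1 and 2;
--     # the first goat index not equal to user_input, plus one.
--     return 3 if user_input == 1 else 2
-- ===== Notes on version B (the rewrite author's own statement) =====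
-- stated objective: simpler
-- what changed: Replaced the enumerate loop over the fixed doors list by a closed-form conditional: the first goat index not chosen is 2 when user_input == 1, else 1, so return 3 or 2.
import Mathlib
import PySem

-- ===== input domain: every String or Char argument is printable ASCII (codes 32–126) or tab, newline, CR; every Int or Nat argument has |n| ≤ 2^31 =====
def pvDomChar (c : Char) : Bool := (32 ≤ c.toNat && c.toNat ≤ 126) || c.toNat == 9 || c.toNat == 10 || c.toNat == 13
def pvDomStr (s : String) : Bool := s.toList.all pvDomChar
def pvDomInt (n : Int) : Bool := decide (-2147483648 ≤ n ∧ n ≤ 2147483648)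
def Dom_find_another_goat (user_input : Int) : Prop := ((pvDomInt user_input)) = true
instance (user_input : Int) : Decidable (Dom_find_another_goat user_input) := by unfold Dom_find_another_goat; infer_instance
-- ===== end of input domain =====

-- B replaces A's enumerate loop over the fixed doors list with a closed-form conditional (simpler).

-- ===== PORT A =====
-- module constant: doors = ['car'] + ['goat'] * 2
def doors : List String := ["car"] ++ ["goat", "goat"]

-- A's loop with break: scan enumerate(doors), skip i == user_input, break at the
-- first 'goat'; returns the found index (the loop always breaks on this list,
-- so 'another_goat' is always bound).
def find_another_goat_loop (user_input : Int) : List (Int × String) → Option Int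
  | [] => none
  | (i, w) :: rest =>
    if i == user_input then find_another_goat_loop user_input rest
    else if w == "goat" then some i
    else find_another_goat_loop user_input rest

def find_another_goat (user_input : Int) : Int :=
  match find_another_goat_loop user_input (PySem.List.enumerate doors) with
  | some another_goat => another_goat + 1
  | none => 0  -- unreachable on doors (a goat not equal to user_input always exists)

-- ===== PORT B =====
def find_another_goat_alt (user_input : Int) : Int :=
  if user_input == 1 then 3 else 2

-- ===== PRECONDITION & SPEC =====
def Spec_find_another_goat (user_input : Int) (out : Int) : Prop := out = find_another_goat_alt user_input
instance (user_input : Int) (out : Int) : Decidable (Spec_find_another_goat user_input out) := by unfold Spec_find_another_goat; infer_instance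

-- ===== CLAIM (what is proved, stated in full; the proofs are below) =====
def Claim_equal_find_another_goat : Prop := ∀ (user_input : Int), Dom_find_another_goat user_input → Spec_find_another_goat user_input (find_another_goat user_input)

-- ===== LEMMAS AND PROOFS =====

-- ===== VERDICT (by name: the statement is the Claim_ definition above) =====
theorem find_another_goat_spec : Claim_equal_find_another_goat := by
  intro u _
  unfold Spec_find_another_goat find_another_goat find_another_goat_alt
  by_cases h1 : u = 1
  · subst h1; decide
  · by_cases h0 : u = 0
    · subst h0; decide
    · simp [doors, PySem.List.enumerate, find_another_goat_loop,
        show ¬(0 = u) from fun h => h0 h.symm, show ¬(1 = u) from fun h => h1 h.symm, h1, h0]
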